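-- pv_equiv track=rewrite | github.com/kelvinlimwan/Rummy-Playing-Bot | bonus_play.py | n_of_a_kind
-- ===== SOURCE A (Python) =====
-- def n_of_a_kind(group):
--     '''Returns True if the `group` is a valid N-of-a-kind, and False
--     otherwise'''
--
--     # `group` is not a valid N-of-a-kind if there are less than 3 cards in it
--     if len(group) < 3:
--         return False
--
--     # when a joker is in `group`
--     if 'XX' in group:
--         # remove the joker from a `group` copy
--         group_without_joker = group.copy()
--         group_without_joker.remove('XX')
--
--         # `group` is not a valid N-of-a-kind if not all the cards have the same
--         # value, excluding jokers
--         value = group_without_joker[0][0]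
--         for card in group_without_joker[1:]:
--             if card[0] != value:
--                 return False
--
--         suits_in_group = []
--         # `group` is not a valid N-of-a-kind if there are two or three cards
--         # and they do not all have different suits
--         if len(group_without_joker) <= 3:
--             for card in group_without_joker:
--                 if card[1] in suits_in_group:
--                     return False
--                 else:
--                     suits_in_group.append(card[1])
--             return True
--
--         # `group` is a valid N-of-a-kind if there are more than three cards and
--         # there is at least three suits present
--         else:
--             for card in group_without_joker:
--                 if card[1] not in suits_in_group:
--                     suits_in_group.append(card[1])
--                     if len(suits_in_group) == 3:
--                         return True
--             return False
--
--     # when there is no joker in `group`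
--     else:
--         # `group` is not a valid N-of-a-kind if not all the cards have the same
--         # value, excluding jokers
--         value = group[0][0]
--         for card in group[1:]:
--             if card[0] != value:
--                 return False
--
--         suits_in_group = []
--         # when there are exactly 3 cards in `group`, check if each card has a
--         # unique suit; if not, `group` is not a valid N-of-a-kind
--         if len(group) == 3:
--             for card in group:
--                 if card[1] in suits_in_group:
--                     return False
--                 else:
--                     suits_in_group.append(card[1])
--             return True
--
--         # when there are more than 3 cards in `group`, check if all suits are
--         # present; if not, `group` is not a valid N-of-a-kind
--         else:
--             for card in group:
--                 if card[1] not in suits_in_group: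
--                     suits_in_group.append(card[1])
--                     if len(suits_in_group) == 4:
--                         return True
--             return False
-- ===== SOURCE B (Python) =====
-- def n_of_a_kind(group):
--     '''Returns True if the `group` is a valid N-of-a-kind, and False
--     otherwise'''
--     if len(group) < 3:
--         return False
--     # single left-to-right pass: skip the first joker in flight, check the
--     # shared value card by card, and accumulate the suit set and card count
--     skipped = False
--     value = None
--     suits = set()
--     count = 0
--     for card in group:
--         if not skipped and card == 'XX':
--             skipped = True
--             continue
--         if value is not None and card[0] != value:
--             return False
--         value = card[0]
--         suits.add(card[1])
--         count += 1
--     if count <= 3: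
--         return len(suits) == count
--     return len(suits) >= (3 if skipped else 4)
-- ===== Notes on version B (the rewrite author's own statement) =====
-- stated objective: simpler
-- what changed: A's two duplicated branches with a joker-removed copy, a separate value-checking pass and four incremental suit loops are replaced by ONE left-to-right pass that skips the first joker in flight while simultaneously checking the shared value and accumulating the suit set and card count, deciding at the end from the counts.
-- outside the precondition, e.g. on n_of_a_kind(['AH', 'AH', 'A']): A returns False, B raises IndexError; on n_of_a_kind(['A', 'BH', 'CH']): A returns False, B raises IndexError
import Mathlib
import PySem

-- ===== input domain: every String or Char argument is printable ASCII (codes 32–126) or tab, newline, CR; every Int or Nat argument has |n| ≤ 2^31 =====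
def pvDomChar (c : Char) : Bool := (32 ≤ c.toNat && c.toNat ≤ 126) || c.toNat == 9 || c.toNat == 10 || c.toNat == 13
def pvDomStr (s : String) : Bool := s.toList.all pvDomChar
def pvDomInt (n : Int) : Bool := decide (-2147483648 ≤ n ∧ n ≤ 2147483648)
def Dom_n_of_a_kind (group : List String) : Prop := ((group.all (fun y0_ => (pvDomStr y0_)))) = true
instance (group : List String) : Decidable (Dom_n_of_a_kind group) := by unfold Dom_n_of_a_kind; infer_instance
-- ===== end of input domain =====

-- B replaces A's duplicated joker/no-joker branches and staged loops by one single pass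
-- that skips the first joker in flight and accumulates value check, suit set and count (simpler).


-- ===== PORT A =====
-- 'for card in rest: if card[0] != value: return False' (True = fell through)
def pvA_allValue (value : Char) : List String → Bool
  | [] => true
  | c :: rest =>
    match PySem.Str.pyGet? c 0 with
    | none => false          -- card[0] raises IndexError in Python; excluded by Pre_
    | some ch => if ch ≠ value then false else pvA_allValue value rest

-- the ≤3-cards suit loop: return False on a repeated suit, True when the loop ends
def pvA_distinct (seen : List Char) : List String → Bool
  | [] => true
  | c :: rest =>
    match PySem.Str.pyGet? c 1 with
    | none => false          -- card[1] raises IndexError in Python; excluded by Pre_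
    | some ch => if seen.contains ch then false else pvA_distinct (seen ++ [ch]) rest

-- the >3-cards suit loop: return True as soon as `n` distinct suits were seen, False at the end
def pvA_atLeast (n : Nat) (seen : List Char) : List String → Bool
  | [] => false
  | c :: rest =>
    match PySem.Str.pyGet? c 1 with
    | none => false          -- card[1] raises IndexError in Python; excluded by Pre_
    | some ch =>
      if seen.contains ch then pvA_atLeast n seen rest
      else if seen.length + 1 = n then true
      else pvA_atLeast n (seen ++ [ch]) rest

def n_of_a_kind (group : List String) : Bool :=
  if group.length < 3 then false
  else if group.contains "XX" then
    let gw := group.erase "XX"        -- group.copy(); remove('XX') = drop the first joker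
    match gw with
    | [] => false                      -- unreachable: gw has ≥ 2 elements
    | g0 :: rest =>
      match PySem.Str.pyGet? g0 0 with
      | none => false                  -- group_without_joker[0][0] raises; excluded by Pre_
      | some value =>
        if pvA_allValue value rest then
          if gw.length ≤ 3 then pvA_distinct [] gw else pvA_atLeast 3 [] gw
        else false
  else
    match group with
    | [] => false                      -- unreachable: length ≥ 3
    | g0 :: rest =>
      match PySem.Str.pyGet? g0 0 with
      | none => false                  -- group[0][0] raises; excluded by Pre_
      | some value =>
        if pvA_allValue value rest then
          if group.length = 3 then pvA_distinct [] group else pvA_atLeast 4 [] group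
        else false

-- ===== PORT B =====
-- the single pass: state = (skipped, value, suits, count), decided at the end of the list
def pvB_go (cards : List String) (skipped : Bool) (value : Option Char)
    (suits : PySem.Set Char) (count : Nat) : Bool :=
  match cards with
  | [] =>
    if count ≤ 3 then decide (suits.length = count)
    else decide ((if skipped then 3 else 4) ≤ suits.length)
  | card :: rest =>
    if !skipped && card == "XX" then pvB_go rest true value suits count
    else
      match PySem.Str.pyGet? card 0 with
      | none => false                  -- card[0] raises IndexError in Python; excluded by Pre_
      | some c0 =>
        if value.any (fun v => c0 != v) then false
        else
          match PySem.Str.pyGet? card 1 with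
          | none => false              -- card[1] raises IndexError in Python; excluded by Pre_
          | some c1 => pvB_go rest skipped (some c0) (suits.add c1) (count + 1)

def n_of_a_kind_alt (group : List String) : Bool :=
  if group.length < 3 then false
  else pvB_go group false none PySem.Set.empty 0

-- ===== PRECONDITION & SPEC =====
-- Pre_ excludes groups of ≥ 3 cards whose joker-removed card list makes the char indexing
-- raise IndexError: an empty card, a first card shorter than 2 chars, or a 1-char card whose
-- char still matches the shared value — B's single pass indexes each card's suit as it goes,
-- so a few such inputs on which A happens to return early are excluded too (see claim cites).
def pvSafe2 (v : Char) : List String → Bool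
  | [] => true
  | c :: tl =>
    match c.toList with
    | [] => false
    | [a] => decide (a ≠ v)
    | a :: _ :: _ => if a = v then pvSafe2 v tl else true

def pvSafe : List String → Bool
  | [] => true
  | c0 :: tl =>
    match c0.toList with
    | a :: _ :: _ => pvSafe2 a tl
    | _ => false

def Pre_n_of_a_kind (group : List String) : Prop :=
  group.length < 3 ∨
  pvSafe (if group.contains "XX" then group.erase "XX" else group) = true
instance (group : List String) : Decidable (Pre_n_of_a_kind group) := by
  unfold Pre_n_of_a_kind; infer_instance

def pvWitness_n_of_a_kind : List String := ["3H", "3S", "XX", "3D"]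

def Spec_n_of_a_kind (group : List String) (out : Bool) : Prop := out = n_of_a_kind_alt group
instance (group : List String) (out : Bool) : Decidable (Spec_n_of_a_kind group out) := by
  unfold Spec_n_of_a_kind; infer_instance

-- ===== CLAIM (what is proved, stated in full; the proofs are below) =====
def Claim_equal_n_of_a_kind : Prop := ∀ (group : List String), Dom_n_of_a_kind group → Pre_n_of_a_kind group → Spec_n_of_a_kind group (n_of_a_kind group)

-- ===== LEMMAS AND PROOFS =====
-- the suit character of a card, total form (only used under `2 ≤ c.toList.length`)
def pvSec (c : String) : Char := (PySem.Str.pyGet? c 1).getD 'A'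

theorem pvSec_some {c : String} (h : 2 ≤ c.toList.length) :
    PySem.Str.pyGet? c 1 = some (pvSec c) := by
  match hc : c.toList with
  | [] => simp [hc] at h
  | [_] => simp [hc] at h
  | a :: b :: t => simp [pvSec, PySem.Str.pyGet?, PySem.Chars.pyGet?, PySem.List.pyGet?, hc,
      PySem.List.pyIdx?]

theorem pvFst_eq (c : String) : PySem.Str.pyGet? c 0 = c.toList.head? := by
  match hc : c.toList with
  | [] => simp [PySem.Str.pyGet?, PySem.Chars.pyGet?, PySem.List.pyGet?, hc, PySem.List.pyIdx?]
  | a :: t => simp [PySem.Str.pyGet?, PySem.Chars.pyGet?, PySem.List.pyGet?, hc, PySem.List.pyIdx?]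


theorem pvSafe2_nil_card {v : Char} {c : String} {tl : List String} (hc : c.toList = []) :
    pvSafe2 v (c :: tl) = false := by rw [pvSafe2, hc]

theorem pvSafe2_one {v a : Char} {c : String} {tl : List String} (hc : c.toList = [a]) :
    pvSafe2 v (c :: tl) = decide (a ≠ v) := by rw [pvSafe2, hc]

theorem pvSafe2_long {v a b : Char} {t : List Char} {c : String} {tl : List String}
    (hc : c.toList = a :: b :: t) :
    pvSafe2 v (c :: tl) = if a = v then pvSafe2 v tl else true := by rw [pvSafe2, hc]

theorem pvSafe_long {a b : Char} {t : List Char} {c0 : String} {tl : List String}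
    (hc : c0.toList = a :: b :: t) :
    pvSafe (c0 :: tl) = pvSafe2 a tl := by rw [pvSafe, hc]

theorem pvUpdate_length_le (s : PySem.Set Char) (xs : List Char) :
    (PySem.Set.update s xs).length ≤ s.length + xs.length := by
  induction xs generalizing s with
  | nil => simp [PySem.Set.update_nil]
  | cons x xs ih =>
    rw [PySem.Set.update_cons]
    refine (ih _).trans ?_
    rw [PySem.Set.add_eq_ite]
    split
    · simp
    · simp
      omega

theorem pvUpdate_length_ge (s : PySem.Set Char) (xs : List Char) :
    s.length ≤ (PySem.Set.update s xs).length := by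
  rw [PySem.Set.update_eq_append_filter]
  simp

theorem pvA_distinct_eq (l : List String) (seen : PySem.Set Char)
    (h2 : ∀ c ∈ l, 2 ≤ c.toList.length) (hs : seen.Nodup) :
    pvA_distinct seen l =
      decide ((PySem.Set.update seen (l.map pvSec)).length = seen.length + l.length) := by
  induction l generalizing seen with
  | nil => simp [pvA_distinct, PySem.Set.update_nil]
  | cons c rest ih =>
    have h2' : ∀ d ∈ rest, 2 ≤ d.toList.length := fun d hd => h2 d (List.mem_cons_of_mem _ hd)
    simp only [pvA_distinct, pvSec_some (h2 c List.mem_cons_self), List.map_cons,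
      PySem.Set.update_cons]
    by_cases hm : pvSec c ∈ seen
    · simp only [PySem.Set.add_of_mem hm]
      have hle := pvUpdate_length_le seen (rest.map pvSec)
      simp only [List.length_map] at hle
      simp [hm]
      omega
    · have hnd : (seen ++ [pvSec c]).Nodup := by
        rw [← PySem.Set.add_of_not_mem hm]; exact PySem.Set.nodup_add _ _ hs
      simp only [PySem.Set.add_of_not_mem hm]
      rw [if_neg (show ¬ (List.contains seen (pvSec c) = true) by simp [hm])]
      rw [ih _ h2' hnd]
      refine decide_eq_decide.mpr ?_
      simp only [List.length_append, List.length_cons, List.length_nil]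
      omega

theorem pvA_atLeast_eq (n : Nat) (l : List String) (seen : PySem.Set Char)
    (h2 : ∀ c ∈ l, 2 ≤ c.toList.length) (hs : seen.Nodup) (hlt : seen.length < n) :
    pvA_atLeast n seen l =
      decide (n ≤ (PySem.Set.update seen (l.map pvSec)).length) := by
  induction l generalizing seen with
  | nil =>
    simp only [pvA_atLeast, List.map_nil, PySem.Set.update_nil]
    have : ¬ n ≤ seen.length := by omega
    simp [this]
  | cons c rest ih =>
    have h2' : ∀ d ∈ rest, 2 ≤ d.toList.length := fun d hd => h2 d (List.mem_cons_of_mem _ hd)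
    simp only [pvA_atLeast, pvSec_some (h2 c List.mem_cons_self), List.map_cons,
      PySem.Set.update_cons]
    by_cases hm : pvSec c ∈ seen
    · simp only [PySem.Set.add_of_mem hm]
      rw [if_pos (show List.contains seen (pvSec c) = true by simp [hm])]
      exact ih _ h2' hs hlt
    · have hnd : (seen ++ [pvSec c]).Nodup := by
        rw [← PySem.Set.add_of_not_mem hm]; exact PySem.Set.nodup_add _ _ hs
      simp only [PySem.Set.add_of_not_mem hm]
      rw [if_neg (show ¬ (List.contains seen (pvSec c) = true) by simp [hm])]
      by_cases hn : seen.length + 1 = n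
      · have hge := pvUpdate_length_ge (seen ++ [pvSec c]) (rest.map pvSec)
        simp only [List.length_append, List.length_cons, List.length_nil] at hge
        have hok : n ≤ (PySem.Set.update (seen ++ [pvSec c]) (rest.map pvSec)).length := by
          omega
        rw [if_pos hn]
        exact (decide_eq_true hok).symm
      · have hlt2 : (seen ++ [pvSec c]).length < n := by
          simp only [List.length_append, List.length_cons, List.length_nil]; omega
        rw [if_neg hn, ih _ h2' hnd hlt2]

-- when the value check succeeds, pvSafe2 forces every card to have at least 2 chars
theorem pvSafe2_len2 {v : Char} {l : List String}
    (hsafe : pvSafe2 v l = true) (hall : pvA_allValue v l = true) :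
    ∀ c ∈ l, 2 ≤ c.toList.length := by
  induction l with
  | nil => intro c hc; simp at hc
  | cons c tl ih =>
    intro d hd
    match hc : c.toList with
    | [] => rw [pvSafe2_nil_card hc] at hsafe; simp at hsafe
    | [a] =>
      rw [pvSafe2_one hc] at hsafe
      rw [pvA_allValue, pvFst_eq, hc] at hall
      simp at hsafe hall
      exact absurd hall.1 hsafe
    | a :: b :: t =>
      rw [pvSafe2_long hc] at hsafe
      rw [pvA_allValue, pvFst_eq, hc] at hall
      simp only [List.head?_cons] at hall
      by_cases hav : a = v
      · rw [if_pos hav] at hsafe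
        rcases List.mem_cons.mp hd with rfl | hd'
        · rw [hc]; simp
        · have hall' : pvA_allValue v tl = true := by
            simpa [hav] using hall
          exact ih hsafe hall' d hd'
      · exfalso
        simp [hav] at hall

-- after a "XX" skip (or in its absence), the guard is dead and the pass is a plain scan
theorem pvB_go_skip (l : List String) (v : Option Char) (s : PySem.Set Char) (c : Nat)
    (hx : "XX" ∈ l) :
    pvB_go l false v s c = pvB_go (l.erase "XX") true v s c := by
  induction l generalizing v s c with
  | nil => simp at hx
  | cons card tl ih =>
    by_cases hcard : card = "XX"
    · subst hcard
      rw [pvB_go]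
      simp only [Bool.not_false, BEq.rfl, Bool.and_true, if_true, List.erase_cons_head]
    · have hx' : "XX" ∈ tl := by
        rcases List.mem_cons.mp hx with h | h
        · exact absurd h.symm hcard
        · exact h
      have hne : (card == "XX") = false := by
        simpa using hcard
      rw [List.erase_cons_tail (by simpa using hcard)]
      rw [pvB_go, pvB_go]
      simp only [hne, Bool.and_false, Bool.not_false, Bool.not_true,
        Bool.false_eq_true, if_false]
      cases PySem.Str.pyGet? card 0 with
      | none => rfl
      | some c0 =>
        simp only []
        by_cases hv : v.any (fun w => c0 != w) = true
        · rw [if_pos hv, if_pos hv]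
        · rw [if_neg hv, if_neg hv]
          cases PySem.Str.pyGet? card 1 with
          | none => rfl
          | some c1 => exact ih _ _ _ hx'

-- characterization of the single pass once a value is fixed, over a safe "XX"-free tail
theorem pvB_go_char (sk : Bool) (l : List String) (v : Char) (s : PySem.Set Char) (c : Nat)
    (hx : sk = true ∨ "XX" ∉ l) (hsafe : pvSafe2 v l = true) :
    pvB_go l sk (some v) s c =
      if pvA_allValue v l then
        (if c + l.length ≤ 3 then
           decide ((PySem.Set.update s (l.map pvSec)).length = c + l.length)
         else decide ((if sk then 3 else 4) ≤ (PySem.Set.update s (l.map pvSec)).length))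
      else false := by
  induction l generalizing s c with
  | nil =>
    simp only [pvB_go, pvA_allValue, List.map_nil, PySem.Set.update_nil, List.length_nil,
      Nat.add_zero, if_true]
    rfl
  | cons card tl ih =>
    have hguard : (!sk && card == "XX") = false := by
      rcases hx with h | h
      · simp [h]
      · have : (card == "XX") = false := by
          simp only [beq_eq_false_iff_ne, ne_eq]
          intro hc; exact h (by simp [hc])
        simp [this]
    have hx' : sk = true ∨ "XX" ∉ tl := by
      rcases hx with h | h
      · exact Or.inl h
      · exact Or.inr (fun hm => h (List.mem_cons_of_mem _ hm))
    rw [pvB_go, hguard]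
    simp only [Bool.false_eq_true, if_false]
    match hc : card.toList with
    | [] =>
      rw [pvSafe2_nil_card hc] at hsafe; simp at hsafe
    | [a] =>
      rw [pvSafe2_one hc] at hsafe
      simp only [decide_eq_true_eq] at hsafe
      have h0 : PySem.Str.pyGet? card 0 = some a := by rw [pvFst_eq, hc]; rfl
      have hallf : pvA_allValue v (card :: tl) = false := by
        rw [pvA_allValue, h0]; simp [hsafe]
      rw [h0, hallf]
      simp [hsafe]
    | a :: b :: t =>
      rw [pvSafe2_long hc] at hsafe
      have h0 : PySem.Str.pyGet? card 0 = some a := by rw [pvFst_eq, hc]; rfl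
      have h1 : PySem.Str.pyGet? card 1 = some (pvSec card) :=
        pvSec_some (by rw [hc]; simp)
      rw [h0]
      by_cases hav : a = v
      · subst hav
        rw [if_pos rfl] at hsafe
        have hallc : pvA_allValue a (card :: tl) = pvA_allValue a tl := by
          rw [pvA_allValue, h0]; simp
        simp only [Option.any_some, bne_self_eq_false, Bool.false_eq_true, if_false, h1]
        rw [ih _ _ hx' hsafe, hallc]
        by_cases hall : pvA_allValue a tl = true
        · simp only [hall, if_true]
          rw [List.map_cons, PySem.Set.update_cons]
          have hlen : c + 1 + tl.length = c + (card :: tl).length := by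
            simp; omega
          rw [hlen]
        · simp [hall]
      · have hv : (Option.any (fun w => a != w) (some v)) = true := by
          simp [bne_iff_ne, hav]
        have hallf : pvA_allValue v (card :: tl) = false := by
          rw [pvA_allValue, h0]; simp [hav]
        simp only [hv, if_true, hallf, Bool.false_eq_true, if_false]

-- the common core: A's per-branch code equals B's pass started on the same card list
theorem pvCore (sk : Bool) (g0 : String) (rest : List String)
    (P : Prop) [Decidable P] (hP : P ↔ (g0 :: rest).length ≤ 3)
    (hx : sk = true ∨ "XX" ∉ (g0 :: rest))
    (hsafe : pvSafe (g0 :: rest) = true) :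
    (match PySem.Str.pyGet? g0 0 with
      | none => false
      | some value =>
        if pvA_allValue value rest = true then
          if P then pvA_distinct [] (g0 :: rest)
          else pvA_atLeast (if sk then 3 else 4) [] (g0 :: rest)
        else false)
    = pvB_go (g0 :: rest) sk none PySem.Set.empty 0 := by
  match hc : g0.toList with
  | [] => rw [pvSafe] at hsafe; rw [hc] at hsafe; simp at hsafe
  | [a] => rw [pvSafe] at hsafe; rw [hc] at hsafe; simp at hsafe
  | a :: b :: t =>
    rw [pvSafe_long hc] at hsafe
    have h0 : PySem.Str.pyGet? g0 0 = some a := by rw [pvFst_eq, hc]; rfl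
    have h1 : PySem.Str.pyGet? g0 1 = some (pvSec g0) := pvSec_some (by rw [hc]; simp)
    have hguard : (!sk && g0 == "XX") = false := by
      rcases hx with h | h
      · simp [h]
      · have : (g0 == "XX") = false := by
          simp only [beq_eq_false_iff_ne, ne_eq]
          intro hg; exact h (by simp [hg])
        simp [this]
    have hx' : sk = true ∨ "XX" ∉ rest := by
      rcases hx with h | h
      · exact Or.inl h
      · exact Or.inr (fun hm => h (List.mem_cons_of_mem _ hm))
    -- unfold one step of B
    rw [h0]
    conv_rhs => rw [pvB_go]
    rw [hguard]
    simp only [Bool.false_eq_true, if_false, h0, Option.any_none, Bool.false_eq_true, if_false,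
      h1]
    rw [pvB_go_char sk rest a _ _ hx' hsafe]
    by_cases hall : pvA_allValue a rest = true
    · have h2 : ∀ c ∈ g0 :: rest, 2 ≤ c.toList.length := by
        intro d hd
        rcases List.mem_cons.mp hd with rfl | hd'
        · rw [hc]; simp
        · exact pvSafe2_len2 hsafe hall d hd'
      rw [if_pos hall, if_pos hall]
      rw [pvA_distinct_eq _ _ h2 List.nodup_nil,
        pvA_atLeast_eq (if sk then 3 else 4) _ _ h2 List.nodup_nil
          (by split <;> simp)]
      have hupd : PySem.Set.update PySem.Set.empty ((g0 :: rest).map pvSec)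
          = PySem.Set.update (PySem.Set.add PySem.Set.empty (pvSec g0)) (rest.map pvSec) := by
        rw [List.map_cons, PySem.Set.update_cons]
      rw [← hupd]
      have hlen : 1 + rest.length = (g0 :: rest).length := by simp; omega
      rw [hlen]
      have hupd0 : PySem.Set.update ([] : PySem.Set Char) ((g0 :: rest).map pvSec)
          = PySem.Set.update PySem.Set.empty ((g0 :: rest).map pvSec) := rfl
      rw [hupd0]
      by_cases h3 : (g0 :: rest).length ≤ 3
      · rw [if_pos (hP.mpr h3), if_pos h3]
        refine decide_eq_decide.mpr ?_
        simp
      · rw [if_neg (fun hp => h3 (hP.mp hp)), if_neg h3]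
    · rw [if_neg hall, if_neg hall]

theorem pvMain (group : List String) (hpre : Pre_n_of_a_kind group) :
    n_of_a_kind group = n_of_a_kind_alt group := by
  unfold n_of_a_kind n_of_a_kind_alt
  unfold Pre_n_of_a_kind at hpre
  by_cases hlen : group.length < 3
  · simp [hlen]
  · simp only [hlen, if_false]
    rcases hpre with h | hpre
    · omega
    by_cases hjoker : group.contains "XX" = true
    · simp only [hjoker, if_true] at hpre ⊢
      have hmem : "XX" ∈ group := by simpa using hjoker
      cases hE : group.erase "XX" with
      | nil =>
        exfalso
        have hl := List.length_erase (l := group) (a := "XX")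
        rw [hE] at hl
        simp [hmem] at hl
        omega
      | cons g0 rest =>
        rw [hE] at hpre
        rw [pvB_go_skip group none PySem.Set.empty 0 hmem, hE]
        exact pvCore true g0 rest _ Iff.rfl (Or.inl rfl) hpre
    · have hj : group.contains "XX" = false := by simpa using hjoker
      have hnm : "XX" ∉ group := by simpa using hj
      simp only [hj, Bool.false_eq_true, if_false] at hpre ⊢
      cases hE : group with
      | nil => rw [hE] at hlen; simp at hlen
      | cons g0 rest =>
        rw [hE] at hpre hlen hnm
        exact pvCore false g0 rest _ (by omega) (Or.inr hnm) hpre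

-- ===== VERDICT (by name: the statement is the Claim_ definition above) =====
theorem n_of_a_kind_spec : Claim_equal_n_of_a_kind := by
  intro group _ hpre
  unfold Spec_n_of_a_kind
  exact pvMain group hpre
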